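-- pv_equiv track=rewrite | github.com/cffeeSunny/cffeeSunny | week7/ex_N2_slaac_reversion.py | slaac_reversion
-- ===== SOURCE A (Python) =====
-- def slaac_reversion(ipv6_address: str) -> str:
--     ip6 = ipv6_address.replace(":","")
--     ip6 = ip6.replace("fffe","")
--     ip6_doubles = []
--     for i in range (0,len(ip6),2):
--         ip6_doubles.append(ip6[i:i+2])
--     ip6_doubles = ip6_doubles[-6::]
--     ip4_bytes = []
--     for element in ip6_doubles:
--         byte_int = int(element, 16)
--         ip4_bytes.append(f"{byte_int:08b}")
--     first_el = ip4_bytes[0]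
--     flip_bit = 1 - int(first_el [6])
--     flipped_el = first_el[:6] + str(flip_bit) + first_el[7:]
--     ip4_bytes_flip = []
--     ip4_bytes_flip.append(flipped_el)
--     for element in range (1,len(ip4_bytes)):
--         ip4_bytes_flip.append(ip4_bytes[element])
--     result = ""
--     for element in ip4_bytes_flip:
--         element_int = int(element, 2)
--         result += f"{element_int:02X}".upper() + ":"
--     result = result[:-1]
--     return (result)
--
--     pass
-- ===== SOURCE B (Python) =====
-- def slaac_reversion(ipv6_address: str) -> str:
--     hexstr = ipv6_address.replace(":", "").replace("fffe", "")
--     byte_vals = [int(hexstr[i:i + 2], 16) for i in range(0, len(hexstr), 2)][-6:]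
--     byte_vals[0] ^= 2
--     return ":".join("%02X" % b for b in byte_vals)
-- ===== Notes on version B (the rewrite author's own statement) =====
-- stated objective: simpler
-- what changed: B keeps each byte as an integer and flips the U/L bit with XOR 2 and formats with %02X directly, removing A's encode-to-8-char-binary-string, character-splice flip, and decode-from-binary passes.
-- outside the precondition, e.g. on slaac_reversion('-2'): A returns '00', B returns '-4'; on slaac_reversion('-41'): A returns '-6:01', B returns '-2:01'; on slaac_reversion('+f'): A returns '0D', B returns '0D'
import Mathlib
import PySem

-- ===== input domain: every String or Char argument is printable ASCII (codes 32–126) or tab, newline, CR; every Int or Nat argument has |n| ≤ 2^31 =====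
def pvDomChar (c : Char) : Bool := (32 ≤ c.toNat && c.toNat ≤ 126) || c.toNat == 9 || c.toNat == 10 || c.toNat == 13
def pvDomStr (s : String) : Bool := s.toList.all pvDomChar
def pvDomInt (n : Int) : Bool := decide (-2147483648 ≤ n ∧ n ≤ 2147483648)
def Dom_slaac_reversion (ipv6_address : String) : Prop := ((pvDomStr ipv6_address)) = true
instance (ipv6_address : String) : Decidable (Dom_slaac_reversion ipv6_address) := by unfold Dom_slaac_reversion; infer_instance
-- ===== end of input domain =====

-- B replaces A's encode-to-binary-string / splice-one-character / decode passes by integer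
-- arithmetic (XOR 2 on the first byte) and direct %02X formatting; objective: simpler.

-- shared formatting helper: hand port of Python's f"{v:02X}" / "%02X" % v
-- (uppercase hex digits of |v|, sign in front, zero-padded to width 2); exact for the
-- values that reach it on the claimed domain (0 ≤ v < 256).
def pvFmt02X (v : Int) : List Char :=
  PySem.Chars.zfill (if v < 0 then '-' :: (Nat.toDigits 16 (-v).toNat).map PySem.Chars.upperChar
    else (Nat.toDigits 16 v.toNat).map PySem.Chars.upperChar) 2

-- ===== PORT A =====
-- int(e, 16) / int(e, 2) / int(c) are PySem.Int.ofCharsBase? / ofChars?; they are `none`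
-- exactly where Python raises ValueError — those inputs are outside Pre_, so the `.getD`
-- defaults are never reached on the claimed domain. f"{n:08b}" = zfill (toBinChars n) 8.
def slaac_reversion (ipv6_address : String) : String :=
  let ip6 := PySem.Chars.replace ipv6_address.toList [':'] []
  let ip6 := PySem.Chars.replace ip6 ['f','f','f','e'] []
  let ip6_doubles := (PySem.List.pyRange 0 (PySem.List.len ip6) 2).foldl
      (fun acc i => acc ++ [PySem.List.slice ip6 (some i) (some (i + 2))]) []
  let ip6_doubles := PySem.List.slice ip6_doubles (some (-6)) none
  let ip4_bytes := ip6_doubles.foldl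
      (fun acc e => acc ++ [PySem.Chars.zfill
        (PySem.Int.toBinChars ((PySem.Int.ofCharsBase? e 16).getD 0)) 8]) []
  let first_el := (PySem.List.pyGet? ip4_bytes 0).getD []   -- IndexError on empty: outside Pre_
  let flip_bit : Int := 1 - (PySem.Int.ofChars? [(PySem.List.pyGet? first_el 6).getD ' ']).getD 0
  let flipped_el := PySem.List.slice first_el none (some 6) ++ PySem.Int.toChars flip_bit
      ++ PySem.List.slice first_el (some 7) none
  let ip4_bytes_flip := [flipped_el] ++ (PySem.List.pyRange 1 (PySem.List.len ip4_bytes) 1).foldl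
      (fun acc i => acc ++ [(PySem.List.pyGet? ip4_bytes i).getD []]) []
  let result := ip4_bytes_flip.foldl
      (fun r e => r ++ PySem.Chars.upper (pvFmt02X ((PySem.Int.ofCharsBase? e 2).getD 0)) ++ [':']) []
  String.ofList (PySem.List.slice result none (some (-1)))

-- ===== PORT B =====
def slaac_reversion_alt (ipv6_address : String) : String :=
  let hexstr := PySem.Chars.replace (PySem.Chars.replace ipv6_address.toList [':'] [])
      ['f','f','f','e'] []
  let byte_vals := PySem.List.slice ((PySem.List.pyRange 0 (PySem.List.len hexstr) 2).map
      (fun i => (PySem.Int.ofCharsBase? (PySem.List.slice hexstr (some i) (some (i + 2))) 16).getD 0))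
      (some (-6)) none
  let byte_vals := match byte_vals with        -- byte_vals[0] ^= 2 ; IndexError on []: outside Pre_
    | [] => []
    | b :: rest => PySem.Int.bxor b 2 :: rest
  String.ofList (PySem.Chars.join [':'] (byte_vals.map pvFmt02X))

-- ===== PRECONDITION & SPEC =====
def pvHexChars : List Char :=
  ['0','1','2','3','4','5','6','7','8','9','a','b','c','d','e','f','A','B','C','D','E','F']

-- Pre_ excludes (a) inputs on which A raises (a character int(·,16) cannot parse, or nothing
-- left after stripping ':' and 'fffe' — IndexError on ip4_bytes[0]), and (b) degenerate chunks
-- such as '-2', '+f' or '1 ' that int(·,16) happens to tolerate: no caller would specify a MAC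
-- derivation on signed or padded half-bytes, so the claim is restricted to the natural domain
-- of hex digits and colons.
def Pre_slaac_reversion (ipv6_address : String) : Prop :=
  (ipv6_address.toList.all (fun c => c == ':' || pvHexChars.contains c)) = true ∧
  PySem.Chars.replace (PySem.Chars.replace ipv6_address.toList [':'] []) ['f','f','f','e'] [] ≠ []

instance (ipv6_address : String) : Decidable (Pre_slaac_reversion ipv6_address) := by
  unfold Pre_slaac_reversion; infer_instance

def pvWitness_slaac_reversion : String := "fe80::0211:22ff:fe33:4455"

def Spec_slaac_reversion (ipv6_address : String) (out : String) : Prop := out = slaac_reversion_alt ipv6_address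
instance (ipv6_address : String) (out : String) : Decidable (Spec_slaac_reversion ipv6_address out) := by unfold Spec_slaac_reversion; infer_instance

-- ===== CLAIM (what is proved, stated in full; the proofs are below) =====
def Claim_equal_slaac_reversion : Prop := ∀ (ipv6_address : String), Dom_slaac_reversion ipv6_address → Pre_slaac_reversion ipv6_address → Spec_slaac_reversion ipv6_address (slaac_reversion ipv6_address)

-- ===== LEMMAS AND PROOFS =====

-- characters of replace.go with empty replacement come from the accumulator or the rest
lemma pv_go_subset (old : List Char) {x : Char} :
    ∀ (fuel : Nat) (l acc : List Char), x ∈ PySem.Chars.replace.go old [] fuel l acc →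
      x ∈ acc ∨ x ∈ l := by
  intro fuel
  induction fuel with
  | zero => intro l acc h; simp [PySem.Chars.replace.go] at h; tauto
  | succ n ih =>
    intro l acc h
    cases l with
    | nil => simp [PySem.Chars.replace.go] at h; tauto
    | cons c t =>
      rw [PySem.Chars.replace.go] at h
      split at h
      · rcases ih _ _ h with h' | h'
        · simp at h'; tauto
        · right; exact List.mem_of_mem_drop h'
      · rcases ih _ _ h with h' | h'
        · simp at h'
          rcases h' with h' | h'
          · right; simp [h']
          · left; exact h'
        · right; exact List.mem_cons_of_mem _ h'

lemma pv_mem_replace_nil {s old : List Char} (hold : old ≠ []) {x : Char}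
    (hx : x ∈ PySem.Chars.replace s old []) : x ∈ s := by
  unfold PySem.Chars.replace at hx
  rw [if_neg (by simpa using hold)] at hx
  rcases pv_go_subset old _ _ _ hx with h | h
  · simp at h
  · exact h

lemma pv_go_single (c : Char) :
    ∀ (l : List Char) (acc : List Char) (fuel : Nat), l.length ≤ fuel →
      PySem.Chars.replace.go [c] [] fuel l acc = acc.reverse ++ l.filter (· ≠ c) := by
  intro l
  induction l with
  | nil => intro acc fuel _; cases fuel <;> simp [PySem.Chars.replace.go]
  | cons h t ih =>
    intro acc fuel hf
    cases fuel with
    | zero => simp at hf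
    | succ n =>
      rw [PySem.Chars.replace.go]
      by_cases hc : h = c
      · rw [if_pos (by simp [List.isPrefixOf, hc])]
        simp only [List.length_cons, List.length_nil, List.drop_succ_cons, List.drop_zero,
          List.reverse_nil, List.nil_append]
        rw [ih _ _ (by simpa using hf)]
        simp [hc]
      · rw [if_neg (by simp [List.isPrefixOf]; exact fun h' => hc h'.symm)]
        rw [ih _ _ (by simpa using hf)]
        simp [hc]

-- s.replace(c, "") is a filter
lemma pv_replace_single (c : Char) (s : List Char) :
    PySem.Chars.replace s [c] [] = s.filter (· ≠ c) := by
  unfold PySem.Chars.replace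
  rw [if_neg (by simp)]
  simpa using pv_go_single c s [] s.length le_rfl

-- parsing one or two hex digits gives a byte value
set_option maxRecDepth 2048 in
lemma pv_parse1 : ∀ c ∈ pvHexChars,
    0 ≤ (PySem.Int.ofCharsBase? [c] 16).getD 0 ∧ (PySem.Int.ofCharsBase? [c] 16).getD 0 < 256 := by
  intro c hc
  fin_cases hc <;> exact ⟨by decide, by decide⟩

set_option maxRecDepth 2048 in
lemma pv_parse2 : ∀ c ∈ pvHexChars, ∀ d ∈ pvHexChars,
    0 ≤ (PySem.Int.ofCharsBase? [c, d] 16).getD 0 ∧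
      (PySem.Int.ofCharsBase? [c, d] 16).getD 0 < 256 := by
  intro c hc d hd
  fin_cases hc <;> fin_cases hd <;> exact ⟨by decide, by decide⟩

-- A's bit-6 splice on the 8-bit binary string, re-read in base 2, is XOR 2 (head byte)
set_option maxRecDepth 2048 in
lemma pv_head_nat : ∀ n : Nat, n < 256 →
    (let first_el := PySem.Chars.zfill (PySem.Int.toBinChars (n : Int)) 8
     let flip_bit : Int := 1 - (PySem.Int.ofChars? [(PySem.List.pyGet? first_el 6).getD ' ']).getD 0
     PySem.Chars.upper (pvFmt02X ((PySem.Int.ofCharsBase?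
        (PySem.List.slice first_el none (some 6) ++ PySem.Int.toChars flip_bit
          ++ PySem.List.slice first_el (some 7) none) 2).getD 0))
      = pvFmt02X (PySem.Int.bxor (n : Int) 2)) := by
  intro n h
  interval_cases n <;> decide

-- A's binary round-trip is the identity (tail bytes)
set_option maxRecDepth 2048 in
lemma pv_tail_nat : ∀ n : Nat, n < 256 →
    PySem.Chars.upper (pvFmt02X ((PySem.Int.ofCharsBase?
        (PySem.Chars.zfill (PySem.Int.toBinChars (n : Int)) 8) 2).getD 0))
      = pvFmt02X (n : Int) := by
  intro n h
  interval_cases n <;> decide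

-- a chunk ip6[i:i+2] with 0 ≤ i < len is one or two characters of ip6
lemma pv_chunk_shape (t : List Char) (i : Int) (h0 : 0 ≤ i) (h1 : i < (t.length : Int)) :
    (∃ c ∈ t, PySem.List.slice t (some i) (some (i + 2)) = [c]) ∨
    (∃ c ∈ t, ∃ d ∈ t, PySem.List.slice t (some i) (some (i + 2)) = [c, d]) := by
  obtain ⟨k, rfl⟩ : ∃ k : Nat, i = (k : Int) := ⟨i.toNat, (Int.toNat_of_nonneg h0).symm⟩
  have hk : k < t.length := by exact_mod_cast h1
  have hsl : PySem.List.slice t (some (k : Int)) (some ((k : Int) + 2)) = (t.drop k).take 2 := by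
    have := PySem.List.slice_natCast_add t k 2
    simpa using this
  rw [hsl]
  rcases hd : t.drop k with _ | ⟨c, rest⟩
  · exact absurd (by simpa using congrArg List.length hd) (by omega)
  · have hc : c ∈ t := List.mem_of_mem_drop (by rw [hd]; exact List.mem_cons_self ..)
    rcases rest with _ | ⟨d, rest2⟩
    · exact Or.inl ⟨c, hc, by simp⟩
    · have hdm : d ∈ t := List.mem_of_mem_drop
        (by rw [hd]; exact List.mem_cons_of_mem _ (List.mem_cons_self ..))
      exact Or.inr ⟨c, hc, d, hdm, by simp⟩

-- getting element 0 of a nonempty list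
lemma pv_pyGet_zero {α : Type} (x : α) (xs : List α) (d : α) :
    (PySem.List.pyGet? (x :: xs) 0).getD d = x := by
  simp [PySem.List.pyGet?, PySem.List.pyIdx?]

-- A's copy loop `for element in range(1, len(xs))` rebuilds the tail
lemma pv_tail_map {α : Type} (xs : List α) (d : α) :
    (PySem.List.pyRange 1 (PySem.List.len xs) 1).map
      (fun i => (PySem.List.pyGet? xs i).getD d) = xs.tail := by
  cases xs with
  | nil =>
    rw [show PySem.List.len ([] : List α) = 0 from rfl,
      PySem.List.pyRange_of_pos 1 0 (by omega : (0:Int) < 1)]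
    simp
  | cons x l =>
    have h0 : (0 : Int) < PySem.List.len (x :: l) := by
      simp [PySem.List.len]
    have hmap := PySem.List.map_pyGetD_pyRange_zero (x :: l) d
    rw [PySem.List.pyRange_one_cons h0, List.map_cons] at hmap
    have := List.tail_eq_of_cons_eq hmap
    simpa [PySem.List.pyGetD] using this

-- the result-accumulating loop flattens
lemma pv_foldl_colon (f : List Char → List Char) :
    ∀ (l : List (List Char)) (acc : List Char),
      l.foldl (fun r e => r ++ f e ++ [':']) acc
        = acc ++ (l.map (fun e => f e ++ [':'])).flatten := by
  intro l
  induction l with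
  | nil => intro acc; simp
  | cons e rest ih => intro acc; rw [List.foldl_cons, ih]; simp

-- dropping the trailing ':' turns the flattened pieces into a join
lemma pv_dropLast_flatten :
    ∀ l : List (List Char),
      ((l.map (fun e => e ++ [':'])).flatten).dropLast = PySem.Chars.join [':'] l := by
  intro l
  induction l with
  | nil => simp [PySem.Chars.join_nil]
  | cons p rest ih =>
    cases rest with
    | nil => simp [PySem.Chars.join_singleton]
    | cons q rest2 =>
      rw [List.map_cons, List.flatten_cons,
        List.dropLast_append_of_ne_nil (by simp), ih, PySem.Chars.join_cons_cons]

-- fold the per-element colon suffix back into a join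
lemma pv_finish {α : Type} (x : List Char) (g : α → List Char) (l : List α) :
    ((x ++ [':']) :: l.map (fun i => g i ++ [':'])).flatten.dropLast
      = PySem.Chars.join [':'] (x :: l.map g) := by
  have h := pv_dropLast_flatten (x :: l.map g)
  simpa [List.map_map, Function.comp] using h

-- ===== VERDICT (by name: the statement is the Claim_ definition above) =====
theorem slaac_reversion_spec : Claim_equal_slaac_reversion := by
  intro s _ hpre
  obtain ⟨hhex', hne⟩ := hpre
  have hhex : ∀ c ∈ s.toList, c = ':' ∨ c ∈ pvHexChars := by
    intro c hc
    have := List.all_eq_true.mp hhex' c hc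
    simpa using this
  unfold Spec_slaac_reversion slaac_reversion slaac_reversion_alt
  simp only []
  set t := PySem.Chars.replace (PySem.Chars.replace s.toList [':'] []) ['f','f','f','e'] []
    with ht
  have hthex : ∀ c ∈ t, c ∈ pvHexChars := by
    intro c hc
    have h1 := pv_mem_replace_nil (by simp) hc
    rw [pv_replace_single] at h1
    have h2 := List.mem_filter.mp h1
    rcases hhex c h2.1 with h | h
    · exfalso; have := h2.2; simp [h] at this
    · exact h
  have htne : t ≠ [] := hne
  have htpos : 0 < t.length := List.length_pos_iff.mpr htne
  -- the chunking loop is a map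
  rw [PySem.List.foldl_append_singleton_eq_map, List.nil_append]
  set m := PySem.List.pyRange 0 (PySem.List.len t) 2 with hm
  have hmmem : ∀ i ∈ m, 0 ≤ i ∧ i < (t.length : Int) := by
    intro i hi
    have := (PySem.List.mem_pyRange_iff_of_pos (by omega : (0:Int) < 2) i).mp hi
    exact ⟨this.1, by simpa [PySem.List.len] using this.2.1⟩
  have hmne : m ≠ [] := by
    refine List.ne_nil_of_mem (a := (0 : Int)) ?_
    rw [hm, ← hm]  -- keep m folded elsewhere
    exact (PySem.List.mem_pyRange_iff_of_pos (by omega : (0:Int) < 2) 0).mpr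
      ⟨le_rfl, by simp [PySem.List.len]; omega, by simp⟩
  -- per-chunk byte bound
  have hbound : ∀ i ∈ m, 0 ≤ (PySem.Int.ofCharsBase?
      (PySem.List.slice t (some i) (some (i + 2))) 16).getD 0 ∧
      (PySem.Int.ofCharsBase? (PySem.List.slice t (some i) (some (i + 2))) 16).getD 0 < 256 := by
    intro i hi
    rcases pv_chunk_shape t i (hmmem i hi).1 (hmmem i hi).2 with ⟨c, hc, he⟩ | ⟨c, hc, d, hd, he⟩
    · rw [he]; exact pv_parse1 c (hthex c hc)
    · rw [he]; exact pv_parse2 c (hthex c hc) d (hthex d hd)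
  -- every append-singleton loop is a map
  simp only [PySem.List.foldl_append_singleton_eq_map, List.nil_append]
  -- [-6:] is a drop, and it commutes with the maps
  rw [PySem.List.slice_from_neg_ofNat _ 6 (by omega),
    PySem.List.slice_from_neg_ofNat _ 6 (by omega)]
  simp only [List.length_map, ← List.map_drop, List.map_map]
  -- the surviving index list is nonempty
  have hDne : List.drop (m.length - 6) m ≠ [] := by
    rw [ne_eq, List.drop_eq_nil_iff]
    have : m.length ≠ 0 := fun h => hmne (List.length_eq_zero_iff.mp h)
    omega
  obtain ⟨i0, irest, hD⟩ : ∃ a l, List.drop (m.length - 6) m = a :: l := by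
    rcases h : List.drop (m.length - 6) m with _ | ⟨a, l⟩
    · exact absurd h hDne
    · exact ⟨a, l, rfl⟩
  have hDsub : ∀ i ∈ i0 :: irest, i ∈ m := fun i hi => List.mem_of_mem_drop (hD ▸ hi)
  rw [hD]
  simp only [List.map_cons]
  rw [pv_pyGet_zero, pv_tail_map]
  simp only [List.tail_cons]
  -- head byte: bounds and the bit-splice-equals-XOR lemma
  have hv0 := hbound i0 (hDsub i0 (List.mem_cons_self ..))
  have hhead := pv_head_nat ((PySem.Int.ofCharsBase?
      (PySem.List.slice t (some i0) (some (i0 + 2))) 16).getD 0).toNat (by omega)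
  simp only [Int.toNat_of_nonneg hv0.1] at hhead
  -- the output loop flattens
  rw [pv_foldl_colon (fun e => PySem.Chars.upper (pvFmt02X ((PySem.Int.ofCharsBase? e 2).getD 0))),
    List.nil_append]
  simp only [List.singleton_append, List.map_cons, List.map_map, Function.comp_apply]
  rw [hhead, PySem.List.slice_to_neg_one]
  -- tail bytes: the binary round-trip is the identity
  rw [List.map_congr_left (l := irest)
    (g := fun i => pvFmt02X ((PySem.Int.ofCharsBase?
      (PySem.List.slice t (some i) (some (i + 2))) 16).getD 0) ++ [':']) ?_]
  · rw [pv_finish]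
    simp only [Function.comp_def]
  · intro i hi
    have hv := hbound i (hDsub i (List.mem_cons_of_mem _ hi))
    have htl := pv_tail_nat ((PySem.Int.ofCharsBase?
        (PySem.List.slice t (some i) (some (i + 2))) 16).getD 0).toNat (by omega)
    simp only [Int.toNat_of_nonneg hv.1] at htl
    simp only [Function.comp, htl]
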